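-- pv_equiv track=rewrite | github.com/meelkonline/magicgap-python | AudioSegmentsToVisemes.py | get_next_viseme
-- ===== SOURCE A (Python) =====
-- def get_next_viseme(results, current_frame):
--     for frame, values in sorted(results.items()):
--         if frame <= current_frame:
--             continue
--         for viseme, presence in values.items():
--             if presence == 1:
--                 return viseme, frame - current_frame
--     return None, None
-- ===== SOURCE B (Python) =====
-- def first_active(values):
--     for viseme, presence in values.items():
--         if presence == 1:
--             return viseme
--     return None
--
--
-- def get_next_viseme(results, current_frame):
--     # single linear pass: track the minimum qualifying frame > current_frame (no sort)
--     best = None  # (frame, viseme) with the smallest qualifying frame seen so far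
--     for frame, values in results.items():
--         if frame > current_frame and (best is None or frame < best[0]):
--             viseme = first_active(values)
--             if viseme is not None:
--                 best = (frame, viseme)
--     if best is None:
--         return None, None
--     return best[1], best[0] - current_frame
-- ===== Notes on version B (the rewrite author's own statement) =====
-- stated objective: faster
-- what changed: B replaces A's sort-then-scan over all frames by a single linear pass that tracks the minimum qualifying frame > current_frame (and its first active viseme), removing the sort.
import Mathlib
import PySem

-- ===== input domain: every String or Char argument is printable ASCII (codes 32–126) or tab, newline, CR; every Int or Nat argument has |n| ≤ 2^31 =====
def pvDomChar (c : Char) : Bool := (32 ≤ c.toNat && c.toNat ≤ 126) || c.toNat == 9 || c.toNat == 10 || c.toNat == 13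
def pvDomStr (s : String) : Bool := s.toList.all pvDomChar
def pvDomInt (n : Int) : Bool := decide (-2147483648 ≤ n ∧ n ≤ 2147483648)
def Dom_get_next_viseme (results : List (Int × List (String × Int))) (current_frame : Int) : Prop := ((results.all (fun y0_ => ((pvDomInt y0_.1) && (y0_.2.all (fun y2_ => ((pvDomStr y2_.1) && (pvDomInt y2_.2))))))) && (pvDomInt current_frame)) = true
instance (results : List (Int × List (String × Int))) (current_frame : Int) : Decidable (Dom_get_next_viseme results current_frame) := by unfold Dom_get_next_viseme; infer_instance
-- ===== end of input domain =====

-- B replaces A's sort-then-scan (O(n log n)) by a single linear pass tracking the minimum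
-- qualifying frame > current_frame; same return value everywhere.

-- ===== PORT A =====
-- inner loop of A: first viseme with presence == 1, in dict order
def pvFirstActiveA : List (String × Int) → Option String
  | [] => none
  | (viseme, presence) :: rest =>
      if presence = 1 then some viseme else pvFirstActiveA rest

-- outer loop of A over the sorted items
def pvScanA : List (Int × List (String × Int)) → Int → Option String × Option Int
  | [], _ => (none, none)
  | (frame, values) :: rest, current_frame =>
      if frame ≤ current_frame then pvScanA rest current_frame
      else
        match pvFirstActiveA values with
        | some viseme => (some viseme, some (frame - current_frame))
        | none => pvScanA rest current_frame

-- sorted(results.items()): dict keys are unique, so Python's tuple sort is the stable sort by frame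
def get_next_viseme (results : List (Int × List (String × Int))) (current_frame : Int) : Option String × Option Int :=
  pvScanA (PySem.List.sorted results (fun e => e.1) false) current_frame

-- ===== PORT B =====
-- Source B's first_active helper
def pvFirstActiveB : List (String × Int) → Option String
  | [] => none
  | (viseme, presence) :: rest =>
      if presence = 1 then some viseme else pvFirstActiveB rest

-- Source B's single pass, carrying best = smallest qualifying (frame, viseme) seen so far
def pvScanB : List (Int × List (String × Int)) → Int → Option (Int × String) → Option (Int × String)
  | [], _, best => best
  | (frame, values) :: rest, current_frame, best =>
      if decide (current_frame < frame) && (match best with | none => true | some (bf, _) => decide (frame < bf)) then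
        match pvFirstActiveB values with
        | some viseme => pvScanB rest current_frame (some (frame, viseme))
        | none => pvScanB rest current_frame best
      else pvScanB rest current_frame best

def get_next_viseme_alt (results : List (Int × List (String × Int))) (current_frame : Int) : Option String × Option Int :=
  match pvScanB results current_frame none with
  | none => (none, none)
  | some (frame, viseme) => (some viseme, some (frame - current_frame))

-- ===== PRECONDITION & SPEC =====
def Spec_get_next_viseme (results : List (Int × List (String × Int))) (current_frame : Int) (out : Option String × Option Int) : Prop := out = get_next_viseme_alt results current_frame
instance (results : List (Int × List (String × Int))) (current_frame : Int) (out : Option String × Option Int) : Decidable (Spec_get_next_viseme results current_frame out) := by unfold Spec_get_next_viseme; infer_instance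

-- ===== CLAIM (what is proved, stated in full; the proofs are below) =====
def Claim_equal_get_next_viseme : Prop := ∀ (results : List (Int × List (String × Int))) (current_frame : Int), Dom_get_next_viseme results current_frame → Spec_get_next_viseme results current_frame (get_next_viseme results current_frame)

-- ===== LEMMAS AND PROOFS =====

-- the two inner scans are the same code
theorem firstActiveB_eq_A (values : List (String × Int)) : pvFirstActiveB values = pvFirstActiveA values := by
  induction values with
  | nil => rfl
  | cons p rest ih => cases p with | mk v pr => simp [pvFirstActiveA, pvFirstActiveB, ih]

-- an entry qualifies if its frame is in the future and it has an active viseme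
def pvQual (cf : Int) (e : Int × List (String × Int)) : Bool :=
  decide (cf < e.1) && (pvFirstActiveA e.2).isSome

-- project a found entry to B's accumulator shape
def pvProj : Option (Int × List (String × Int)) → Option (Int × String)
  | none => none
  | some e => some (e.1, (pvFirstActiveA e.2).getD "")

-- one step of B's pass
def pvStep (cf : Int) (best : Option (Int × String)) (x : Int × List (String × Int)) : Option (Int × String) :=
  if decide (cf < x.1) && (match best with | none => true | some (bf, _) => decide (x.1 < bf)) then
    match pvFirstActiveB x.2 with
    | some viseme => some (x.1, viseme)
    | none => best
  else best

theorem pvScanB_cons (x : Int × List (String × Int)) (l : List (Int × List (String × Int))) (cf : Int) (best : Option (Int × String)) :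
    pvScanB (x :: l) cf best = pvScanB l cf (pvStep cf best x) := by
  cases x with | mk f v =>
  cases best <;> (simp only [pvScanB, pvStep]; split)
  · cases pvFirstActiveB v <;> simp
  · rfl
  · cases pvFirstActiveB v <;> simp
  · rfl

-- A's scan is find? of the first qualifying entry
theorem pvScanA_eq_find (s : List (Int × List (String × Int))) (cf : Int) :
    pvScanA s cf = match s.find? (pvQual cf) with
      | none => (none, none)
      | some e => (pvFirstActiveA e.2, some (e.1 - cf)) := by
  induction s with
  | nil => rfl
  | cons x rest ih =>
    cases x with | mk f v =>
    by_cases hf : f ≤ cf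
    · have : pvQual cf (f, v) = false := by simp [pvQual]; omega
      simp [pvScanA, hf, List.find?, this, ih]
    · cases hv : pvFirstActiveA v with
      | none =>
        have : pvQual cf (f, v) = false := by simp [pvQual, hv]
        simp [pvScanA, hf, hv, List.find?, this, ih]
      | some vis =>
        have : pvQual cf (f, v) = true := by simp [pvQual, hv]; omega
        simp [pvScanA, hf, hv, List.find?, this]

theorem insertBy_cons {a : Type} (bef : a → a → Bool) (x y : a) (ys : List a) :
    PySem.List.insertBy bef x (y :: ys) = if bef x y then x :: y :: ys else y :: PySem.List.insertBy bef x ys := rfl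

theorem pvStep_of_not_qual (cf : Int) (best : Option (Int × String)) (x : Int × List (String × Int))
    (h : pvQual cf x = false) : pvStep cf best x = best := by
  simp only [pvQual, Bool.and_eq_false_iff, decide_eq_false_iff_not, not_lt] at h
  rcases h with h | h
  · have hc : decide (cf < x.1) = false := by simp; omega
    cases best <;> simp [pvStep, hc]
  · have hA : pvFirstActiveA x.2 = none := by
      cases hx : pvFirstActiveA x.2
      · rfl
      · rw [hx] at h; simp at h
    cases best <;> simp [pvStep, firstActiveB_eq_A, hA]

-- inserting x into a frame-sorted list: the first qualifying entry updates exactly as B's step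
theorem find_insertBy (cf : Int) (x : Int × List (String × Int)) (s : List (Int × List (String × Int)))
    (hs : s.Pairwise (fun a b => a.1 ≤ b.1)) :
    pvProj ((PySem.List.insertBy (fun a b => decide (a.1 < b.1)) x s).find? (pvQual cf)) =
      pvStep cf (pvProj (s.find? (pvQual cf))) x := by
  induction s with
  | nil =>
    by_cases hcf : cf < x.1 <;>
      cases hA : pvFirstActiveA x.2 <;>
        simp [PySem.List.insertBy, List.find?, pvQual, pvProj, pvStep, firstActiveB_eq_A, hcf, hA]
  | cons y ys ih =>
    rw [List.pairwise_cons] at hs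
    rw [insertBy_cons]
    by_cases hlt : x.1 < y.1
    · simp only [hlt, decide_true, if_true]
      by_cases hqx : pvQual cf x = true
      · have hcf : cf < x.1 := by simp [pvQual] at hqx; omega
        have hAx : (pvFirstActiveA x.2).isSome := by simp [pvQual] at hqx; exact hqx.2
        cases hA : pvFirstActiveA x.2 with
        | none => rw [hA] at hAx; simp at hAx
        | some vis =>
          rw [List.find?_cons_of_pos hqx]
          cases hfind : (y :: ys).find? (pvQual cf) with
          | none => simp [pvProj, pvStep, hcf, firstActiveB_eq_A, hA]
          | some e =>
            have hmem : e ∈ y :: ys := List.mem_of_find?_eq_some hfind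
            have hle : y.1 ≤ e.1 := by
              rcases List.mem_cons.mp hmem with h | h
              · rw [h]
              · exact hs.1 e h
            have hxe : x.1 < e.1 := lt_of_lt_of_le hlt hle
            simp [pvProj, pvStep, hcf, hxe, firstActiveB_eq_A, hA]
      · rw [List.find?_cons_of_neg (by simpa using hqx),
            pvStep_of_not_qual cf _ x (by simpa using hqx)]
    · simp only [hlt, decide_false, Bool.false_eq_true, if_false]
      by_cases hqy : pvQual cf y = true
      · rw [List.find?_cons_of_pos hqy, List.find?_cons_of_pos hqy]
        have : ¬ x.1 < y.1 := hlt
        simp [pvProj, pvStep, this]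
      · rw [List.find?_cons_of_neg (by simpa using hqy),
            List.find?_cons_of_neg (by simpa using hqy)]
        exact ih hs.2

-- B's pass over l, started from the best of (sorted p), is the best of sorted (p ++ l)
theorem pvScanB_sorted (l p : List (Int × List (String × Int))) (cf : Int) :
    pvScanB l cf (pvProj ((PySem.List.sorted p (fun e => e.1) false).find? (pvQual cf))) =
      pvProj ((PySem.List.sorted (p ++ l) (fun e => e.1) false).find? (pvQual cf)) := by
  induction l generalizing p with
  | nil => simp [pvScanB]
  | cons x rest ih =>
    have hsortapp : PySem.List.sorted (p ++ [x]) (fun e : Int × List (String × Int) => e.1) false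
        = PySem.List.insertBy (fun a b => decide (a.1 < b.1)) x (PySem.List.sorted p (fun e => e.1) false) := by
      simp [PySem.List.sorted, List.foldl_append]
    rw [pvScanB_cons,
        ← find_insertBy cf x _ (PySem.List.sorted_pairwise p (fun e => e.1)),
        ← hsortapp, ih (p ++ [x])]
    simp

-- ===== VERDICT (by name: the statement is the Claim_ definition above) =====
theorem get_next_viseme_spec : Claim_equal_get_next_viseme := by
  intro results cf _
  unfold Spec_get_next_viseme get_next_viseme get_next_viseme_alt
  have hB := pvScanB_sorted results [] cf
  simp only [List.nil_append] at hB
  rw [show (PySem.List.sorted ([] : List (Int × List (String × Int))) (fun e => e.1) false) = [] from rfl] at hB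
  simp only [List.find?_nil, pvProj] at hB
  rw [hB, pvScanA_eq_find]
  cases hfind : (PySem.List.sorted results (fun e => e.1) false).find? (pvQual cf) with
  | none => simp
  | some e =>
    have hq : pvQual cf e = true := List.find?_some hfind
    have : (pvFirstActiveA e.2).isSome := by
      simp [pvQual] at hq; exact hq.2
    cases ha : pvFirstActiveA e.2 with
    | none => rw [ha] at this; simp at this
    | some vis => simp [ha]
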